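-- pv_equiv track=rewrite | github.com/AcornDynamics/Zeme | streamlit_app.py | _guess_cadastral_field
-- ===== SOURCE A (Python) =====
-- def _guess_cadastral_field(sample_feature):
--     """Try to guess the cadastral number property from a sample WFS feature."""
--     if not isinstance(sample_feature, dict):
--         return None
--     props = sample_feature.get("properties", {}) or {}
--     candidates = list(props.keys())
--     ranked = []
--     for k in candidates:
--         kl = k.lower()
--         score = 0
--         if "kadastr" in kl or "kadastra" in kl:
--             score += 2
--         if "num" in kl or "nr" in kl:
--             score += 1
--         if kl.endswith("nr") or kl.endswith("numurs"):
--             score += 1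
--         ranked.append((score, k))
--     ranked.sort(reverse=True)
--     return ranked[0][1] if ranked and ranked[0][0] > 0 else None
-- ===== SOURCE B (Python) =====
-- def _guess_cadastral_field(sample_feature):
--     """Try to guess the cadastral number property from a sample WFS feature."""
--     if not isinstance(sample_feature, dict):
--         return None
--     props = sample_feature.get("properties", {}) or {}
--     best = None  # running best (score, key) under Python tuple ordering
--     for k in props:
--         kl = k.lower()
--         score = (2 * ("kadastr" in kl)
--                  + ("num" in kl or "nr" in kl)
--                  + kl.endswith(("nr", "numurs")))
--         if best is None or (score, k) > best:
--             best = (score, k)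
--     return best[1] if best is not None and best[0] > 0 else None
-- ===== Notes on version B (the rewrite author's own statement) =====
-- stated objective: simpler
-- what changed: Replaces building a ranked list of (score, key) tuples plus a reverse sort and taking the head with a single pass over the property keys keeping a running best (score, key) pair under Python tuple ordering; also folds the score into one arithmetic expression and drops the redundant 'kadastra' substring test.
import Mathlib
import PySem

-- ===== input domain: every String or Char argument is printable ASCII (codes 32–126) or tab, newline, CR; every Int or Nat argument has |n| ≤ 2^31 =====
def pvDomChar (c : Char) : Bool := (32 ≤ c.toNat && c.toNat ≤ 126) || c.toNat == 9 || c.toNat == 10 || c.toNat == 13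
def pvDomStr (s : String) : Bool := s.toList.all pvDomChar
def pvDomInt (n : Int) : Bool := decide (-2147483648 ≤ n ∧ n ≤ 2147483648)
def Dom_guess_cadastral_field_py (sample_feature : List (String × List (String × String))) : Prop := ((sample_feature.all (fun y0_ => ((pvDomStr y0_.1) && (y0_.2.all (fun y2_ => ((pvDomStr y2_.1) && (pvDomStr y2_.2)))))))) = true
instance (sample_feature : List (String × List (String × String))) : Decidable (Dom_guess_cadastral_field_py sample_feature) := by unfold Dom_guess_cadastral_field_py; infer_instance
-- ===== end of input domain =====

-- B replaces A's build-rank-list + reverse sort + take-head by a single pass keeping a running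
-- best (score, key) pair under Python tuple order (objective: simpler — no intermediate list, no sort).


-- ===== PORT A =====
-- A's per-key score, accumulated exactly as A's loop does (including the redundant "kadastra" test).
def pvScoreA (k : String) : Int :=
  let kl := PySem.Str.lower k
  let score : Int := 0
  let score := if PySem.Str.isIn "kadastr" kl || PySem.Str.isIn "kadastra" kl then score + 2 else score
  let score := if PySem.Str.isIn "num" kl || PySem.Str.isIn "nr" kl then score + 1 else score
  let score := if PySem.Str.endswith kl "nr" || PySem.Str.endswith kl "numurs" then score + 1 else score
  score

def guess_cadastral_field_py (sample_feature : List (String × List (String × String))) : Option String :=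
  -- sample_feature is a dict in Python, so it always passes the isinstance guard here
  let props := (PySem.Dict.mk sample_feature).getD "properties" []
  -- list(props.keys()): the keys of the dict `props`, first occurrences in order
  let candidates := PySem.List.dedup (props.map (·.1))
  let ranked := candidates.foldl (fun acc k => acc ++ [(pvScoreA k, k)]) ([] : List (Int × String))
  let rankedS := PySem.List.sorted2 ranked (fun p => p.1) (fun p => p.2) true
  match rankedS with
  | [] => none
  | (s, k) :: _ => if s > 0 then some k else none

-- ===== PORT B =====
-- B's per-key score, written as the single arithmetic sum Source B uses.
def pvScoreB (k : String) : Int :=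
  let kl := PySem.Str.lower k
  2 * (if PySem.Str.isIn "kadastr" kl then (1 : Int) else 0)
    + (if PySem.Str.isIn "num" kl || PySem.Str.isIn "nr" kl then (1 : Int) else 0)
    + (if PySem.Str.endswith kl "nr" || PySem.Str.endswith kl "numurs" then (1 : Int) else 0)

def guess_cadastral_field_py_alt (sample_feature : List (String × List (String × String))) : Option String :=
  let props := (PySem.Dict.mk sample_feature).getD "properties" []
  let keys := PySem.List.dedup (props.map (·.1))
  -- the running best (score, key) under Python tuple ordering = first lexicographic maximum
  let best := PySem.List.max2? (keys.map (fun k => (pvScoreB k, k))) (fun p => p.1) (fun p => p.2)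
  match best with
  | some (s, k) => if s > 0 then some k else none
  | none => none

-- ===== PRECONDITION & SPEC =====
def Spec_guess_cadastral_field_py (sample_feature : List (String × List (String × String))) (out : Option String) : Prop := out = guess_cadastral_field_py_alt sample_feature
instance (sample_feature : List (String × List (String × String))) (out : Option String) : Decidable (Spec_guess_cadastral_field_py sample_feature out) := by unfold Spec_guess_cadastral_field_py; infer_instance

-- ===== CLAIM (what is proved, stated in full; the proofs are below) =====
def Claim_equal_guess_cadastral_field_py : Prop := ∀ (sample_feature : List (String × List (String × String))), Dom_guess_cadastral_field_py sample_feature → Spec_guess_cadastral_field_py sample_feature (guess_cadastral_field_py sample_feature)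

-- ===== LEMMAS AND PROOFS =====

-- "kadastra" in kl implies "kadastr" in kl, so A's second disjunct is redundant
lemma pv_isIn_kadastra (kl : String) (h : PySem.Str.isIn "kadastra" kl = true) :
    PySem.Str.isIn "kadastr" kl = true := by
  rw [show PySem.Str.isIn "kadastra" kl = PySem.Chars.isIn "kadastra".toList kl.toList from rfl] at h
  rw [show PySem.Str.isIn "kadastr" kl = PySem.Chars.isIn "kadastr".toList kl.toList from rfl]
  rw [PySem.Chars.isIn_iff_infix] at h ⊢
  exact List.IsInfix.trans (by decide : "kadastr".toList <:+: "kadastra".toList) h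

lemma pvScore_eq (k : String) : pvScoreA k = pvScoreB k := by
  unfold pvScoreA pvScoreB
  have h : (PySem.Str.isIn "kadastr" (PySem.Str.lower k) || PySem.Str.isIn "kadastra" (PySem.Str.lower k))
      = PySem.Str.isIn "kadastr" (PySem.Str.lower k) := by
    cases h2 : PySem.Str.isIn "kadastra" (PySem.Str.lower k) with
    | true => simp only [pv_isIn_kadastra _ h2, Bool.true_or, Bool.or_true]
    | false => simp
  simp only [h]
  split_ifs <;> ring

-- one insertion step, seen only through the head of the accumulator
lemma pv_insertBy_head {α : Type} (before : α → α → Bool) (x : α) (acc : List α) :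
    (PySem.List.insertBy before x acc).head? =
      (match acc.head? with
       | none => some x
       | some y => if before x y then some x else some y) := by
  cases acc with
  | nil => rfl
  | cons y ys => simp only [PySem.List.insertBy, List.head?_cons]; split_ifs <;> simp

lemma pv_foldl_insertBy_head {α : Type} (before : α → α → Bool) :
    ∀ (xs acc : List α),
      (xs.foldl (fun a x => PySem.List.insertBy before x a) acc).head? =
        xs.foldl (fun o x =>
          match o with
          | none => some x
          | some y => if before x y then some x else some y) acc.head? := by
  intro xs
  induction xs with
  | nil => intro acc; rfl
  | cons x xs ih =>
    intro acc
    simp only [List.foldl_cons]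
    rw [ih, pv_insertBy_head]

-- the head of the descending sort is exactly the first lexicographic maximum
lemma pv_head_sorted2_rev (l : List (Int × String)) :
    (PySem.List.sorted2 l (fun p => p.1) (fun p => p.2) true).head? =
      PySem.List.max2? l (fun p => p.1) (fun p => p.2) := by
  unfold PySem.List.sorted2 PySem.List.max2?
  rw [pv_foldl_insertBy_head]
  rfl

-- ===== VERDICT (by name: the statement is the Claim_ definition above) =====
theorem guess_cadastral_field_py_spec : Claim_equal_guess_cadastral_field_py := by
  intro sf _
  unfold Spec_guess_cadastral_field_py guess_cadastral_field_py guess_cadastral_field_py_alt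
  simp only []
  have hranked :
      (PySem.List.dedup (((PySem.Dict.mk sf).getD "properties" []).map (·.1))).foldl
          (fun acc k => acc ++ [(pvScoreA k, k)]) ([] : List (Int × String))
        = (PySem.List.dedup (((PySem.Dict.mk sf).getD "properties" []).map (·.1))).map
            (fun k => (pvScoreB k, k)) := by
    rw [PySem.List.foldl_append_singleton_eq_map]
    exact List.map_congr_left (fun k _ => by rw [pvScore_eq])
  rw [hranked]
  have hhead := pv_head_sorted2_rev
    ((PySem.List.dedup (((PySem.Dict.mk sf).getD "properties" []).map (·.1))).map
      (fun k => (pvScoreB k, k)))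
  cases hs : PySem.List.sorted2
      ((PySem.List.dedup (((PySem.Dict.mk sf).getD "properties" []).map (·.1))).map
        (fun k => (pvScoreB k, k))) (fun p => p.1) (fun p => p.2) true with
  | nil =>
    rw [hs] at hhead
    simp only [List.head?_nil] at hhead
    rw [← hhead]
  | cons p rest =>
    rw [hs] at hhead
    simp only [List.head?_cons] at hhead
    rw [← hhead]
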